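-- pv_equiv track=rewrite | github.com/ochensad/Py_prog | 1 sem/Практикум/ИУ7-12Б Ляпина практика 1 семестр.py | full_Anagrams
-- ===== SOURCE A (Python) =====
-- def full_Anagrams(main_Phrase,dictionary):
-- 	word=''
-- 	flag=0
-- 	main_Phrase+=' '
--
-- 	for i in range(len(main_Phrase)):
-- 		flag=0
--
-- 		if main_Phrase[i]!=' ':
-- 			word+=main_Phrase[i]
--
-- 		else:
--
-- 			for j in range(len(dictionary)):
--
-- 				if word==dictionary[j]:
-- 					flag=1
--
-- 			if flag==0:
-- 				break
--
-- 			word=''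
-- 	return(flag>0)
-- ===== SOURCE B (Python) =====
-- def full_Anagrams(main_Phrase, dictionary):
--     return all(word in dictionary for word in main_Phrase.split(' '))
-- ===== Notes on version B (the rewrite author's own statement) =====
-- stated objective: idiomatic
-- what changed: Replaced A's character-by-character buffer accumulation with flag juggling and an early break by a single-space split of the phrase into tokens and all(word in dictionary for word in tokens).
import Mathlib
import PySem

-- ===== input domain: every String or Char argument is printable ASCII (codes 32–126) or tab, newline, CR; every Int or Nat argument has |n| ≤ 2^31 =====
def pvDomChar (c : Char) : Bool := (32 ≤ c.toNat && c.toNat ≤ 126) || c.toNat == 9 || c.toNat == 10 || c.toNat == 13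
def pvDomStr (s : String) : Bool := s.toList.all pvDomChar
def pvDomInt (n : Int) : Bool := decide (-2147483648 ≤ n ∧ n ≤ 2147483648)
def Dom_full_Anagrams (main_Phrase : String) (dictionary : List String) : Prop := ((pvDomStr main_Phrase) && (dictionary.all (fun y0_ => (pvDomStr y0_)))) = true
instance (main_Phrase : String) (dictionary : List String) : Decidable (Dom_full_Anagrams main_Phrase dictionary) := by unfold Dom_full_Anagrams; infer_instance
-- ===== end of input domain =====

-- B replaces A's character-by-character buffer/flag loop with a single-space split and an all(...) membership check (same result; objective: simpler/idiomatic).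

-- ===== PORT A =====
-- the char loop of A: state = (word buffer, flag); 'break' returns the current flag (0)
def full_Anagrams.go (dictionary : List String) : List Char → List Char → Int → Int
  | [], _word, flag => flag
  | c :: rest, word, _flag =>
      -- top of the loop body: flag = 0
      if c ≠ ' ' then
        full_Anagrams.go dictionary rest (word ++ [c]) 0
      else
        -- inner loop: for j in range(len(dictionary)): if word == dictionary[j]: flag = 1
        let flag := dictionary.foldl (fun f d => if String.ofList word == d then 1 else f) (0 : Int)
        if flag == 0 then flag else full_Anagrams.go dictionary rest [] flag

def full_Anagrams (main_Phrase : String) (dictionary : List String) : Bool :=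
  -- main_Phrase += ' '; loop; return flag > 0
  decide (full_Anagrams.go dictionary (main_Phrase.toList ++ [' ']) [] 0 > 0)

-- ===== PORT B =====
-- Source B: all(word in dictionary for word in main_Phrase.split(' ')); split(' ') = List.splitOn ' '
def full_Anagrams_alt (main_Phrase : String) (dictionary : List String) : Bool :=
  (List.splitOn ' ' main_Phrase.toList).all (fun w => dictionary.contains (String.ofList w))

-- ===== PRECONDITION & SPEC =====
def Spec_full_Anagrams (main_Phrase : String) (dictionary : List String) (out : Bool) : Prop := out = full_Anagrams_alt main_Phrase dictionary
instance (main_Phrase : String) (dictionary : List String) (out : Bool) : Decidable (Spec_full_Anagrams main_Phrase dictionary out) := by unfold Spec_full_Anagrams; infer_instance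

-- ===== CLAIM (what is proved, stated in full; the proofs are below) =====
def Claim_equal_full_Anagrams : Prop := ∀ (main_Phrase : String) (dictionary : List String), Dom_full_Anagrams main_Phrase dictionary → Spec_full_Anagrams main_Phrase dictionary (full_Anagrams main_Phrase dictionary)

-- ===== LEMMAS AND PROOFS =====

lemma modifyHead_nil_append (l : List (List Char)) :
    List.modifyHead (fun x => [] ++ x) l = l := by
  cases l <;> simp

-- the inner dictionary fold is a membership test
lemma fold_flag (w : List Char) (dict : List String) (init : Int) :
    dict.foldl (fun f d => if String.ofList w == d then 1 else f) init
      = if dict.contains (String.ofList w) then 1 else init := by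
  induction dict generalizing init with
  | nil => simp [List.foldl]
  | cons d ds ih =>
      simp only [List.foldl, List.contains_cons]
      by_cases h : (String.ofList w == d) = true
      · simp only [h, if_true, Bool.true_or, ih]
        split_ifs <;> rfl
      · simp only [h, Bool.false_or, ih]
        simp

-- main loop invariant: with the trailing space appended, A's loop computes 1/0
-- according to whether every token (the first one extended by the buffer 'acc') is in the dictionary
lemma go_eq (dict : List String) (s acc : List Char) (f : Int) :
    full_Anagrams.go dict (s ++ [' ']) acc f
      = (if (List.modifyHead (acc ++ ·) (List.splitOn ' ' s)).all
            (fun w => dict.contains (String.ofList w)) then 1 else 0) := by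
  induction s generalizing acc f with
  | nil =>
      simp only [List.nil_append, full_Anagrams.go, if_neg (by simp : ¬ (' ' ≠ ' '))]
      rw [fold_flag]
      by_cases h : dict.contains (String.ofList acc) = true
      · simp [List.splitOn_nil]
      · simp [List.splitOn_nil]
  | cons c rest ih =>
      by_cases hc : c = ' '
      · subst hc
        simp only [List.cons_append, full_Anagrams.go, if_neg (by simp : ¬ (' ' ≠ ' '))]
        rw [fold_flag]
        have hsplit : List.splitOn ' ' (' ' :: rest) = [] :: List.splitOn ' ' rest := by
          simp [List.splitOn, List.splitOnP_cons]
        by_cases h : dict.contains (String.ofList acc) = true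
        · simp only [h, if_true, (by decide : ((1 : Int) == 0) = false), Bool.false_eq_true,
            if_false, ih [] 1, hsplit, List.modifyHead_cons, List.all_cons, List.append_nil,
            Bool.true_and, modifyHead_nil_append]
        · simp only [h, (by decide : ((0 : Int) == 0) = true), if_true, hsplit,
            List.modifyHead_cons, List.all_cons, List.append_nil, Bool.false_and,
            Bool.false_eq_true, if_false]
      · simp only [List.cons_append, full_Anagrams.go, if_pos (by simpa using hc)]
        rw [ih (acc ++ [c]) 0]
        have hsplit : List.splitOn ' ' (c :: rest) =
            List.modifyHead (fun x => c :: x) (List.splitOn ' ' rest) := by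
          simp [List.splitOn, List.splitOnP_cons, hc]
        rw [hsplit, List.modifyHead_modifyHead]
        have hcomp : ((fun x => acc ++ x) ∘ fun x => c :: x) = fun x => acc ++ [c] ++ x := by
          funext x; simp
        rw [hcomp]

-- ===== VERDICT =====
theorem full_Anagrams_spec : Claim_equal_full_Anagrams := by
  intro mp dictionary _
  unfold Spec_full_Anagrams full_Anagrams full_Anagrams_alt
  rw [go_eq, modifyHead_nil_append]
  cases hall : (List.splitOn ' ' mp.toList).all (fun w => dictionary.contains (String.ofList w)) <;>
    simp
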